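-- pv_equiv track=rewrite | github.com/ICS-NLP/Prosit1 | N_grams/preprocessing.py | prepare_ngram_data
-- ===== SOURCE A (Python) =====
-- from typing import List, Tuple, Optional
--
-- def prepare_ngram_data(sentences: List[List[str]], n: int) -> List[Tuple]:
--     """
--     Prepare n-gram training data from tokenized sentences.
--
--     For n-gram modeling, we need (context, target) pairs where:
--     - context = (w_i-n+1, ..., w_i-1)  [n-1 previous words]
--     - target = w_i                      [current word to predict]
--
--     Mathematical Definition:
--     ----------------------
--     An n-gram is a sequence of n consecutive tokens.
--     For a sentence [w_1, w_2, ..., w_m], the n-grams are: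
--         (w_1, w_2, ..., w_n)
--         (w_2, w_3, ..., w_n+1)
--         ...
--         (w_m-n+1, ..., w_m)
--
--     Preparing training data for an n_gram model by converting tokenized sentences
--     into overlapping n_gram examples.
--
--     Args:
--         sentences: List of tokenized sentences
--         n: Order of n-gram (1=unigram, 2=bigram, etc.)
--
--     Returns:
--         List of n-gram tuples
--     """
--     ngrams = []
--
--     for sentence in sentences:
--         # Pad with additional start tokens for higher-order n-grams
--         # This ensures we can predict the first few words
--         if n > 1:
--             padded = ['<s>'] * (n - 1) + sentence[1:]  # Already has one <s>
--         else:
--             padded = sentence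
--
--         # Extract n-grams
--         for i in range(len(padded) - n + 1):
--             ngram = tuple(padded[i:i + n])
--             ngrams.append(ngram)
--
--     return ngrams
-- ===== SOURCE B (Python) =====
-- def _pad(sentence, n):
--     if n > 1:
--         return ['<s>'] * (n - 1) + sentence[1:]
--     return sentence
--
--
-- def _windows(tokens, n):
--     # structural recursion: first window, then recurse on the tail
--     if len(tokens) < n:
--         return []
--     return [tuple(tokens[:n])] + _windows(tokens[1:], n)
--
--
-- def prepare_ngram_data(sentences, n):
--     return [g for s in sentences for g in _windows(_pad(s, n), n)]
-- ===== Notes on version B (the rewrite author's own statement) =====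
-- stated objective: alternative
-- what changed: Replaces the index loop over window start positions by a structurally recursive windows function (first window, then recurse on the tail) composed with a flat comprehension over sentences, instead of nested accumulator loops with per-index slicing.
-- outside the precondition, e.g. on prepare_ngram_data([['a', 'b']], 0): A returns [(), (), ()], B raises RecursionError; on prepare_ngram_data([['a', 'b', 'c']], -1): A returns [('a', 'b'), (), (), (), ()], B raises RecursionError
import Mathlib
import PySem

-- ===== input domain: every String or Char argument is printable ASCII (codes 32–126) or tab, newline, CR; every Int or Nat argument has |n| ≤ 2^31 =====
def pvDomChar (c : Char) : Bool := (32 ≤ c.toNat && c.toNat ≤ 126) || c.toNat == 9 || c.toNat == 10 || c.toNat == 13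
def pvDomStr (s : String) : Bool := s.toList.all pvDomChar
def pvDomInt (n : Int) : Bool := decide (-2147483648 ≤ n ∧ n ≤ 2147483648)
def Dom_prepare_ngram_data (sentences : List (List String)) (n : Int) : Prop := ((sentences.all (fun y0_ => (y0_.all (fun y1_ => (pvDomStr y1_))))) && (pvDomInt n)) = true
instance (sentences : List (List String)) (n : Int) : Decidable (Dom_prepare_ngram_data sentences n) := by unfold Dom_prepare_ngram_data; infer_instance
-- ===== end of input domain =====

-- B replaces A's nested accumulator loops with index slicing by a recursive windows helper
-- (first window, then recurse on the tail) flat-mapped over sentences; objective: alternative.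

-- ===== PORT A =====
def prepare_ngram_data (sentences : List (List String)) (n : Int) : List (List String) :=
  sentences.foldl (fun ngrams sentence =>
    let padded :=
      if n > 1 then List.replicate (n - 1).toNat "<s>" ++ PySem.List.slice sentence (some 1) none
      else sentence
    (PySem.List.pyRange 0 ((padded.length : Int) - n + 1) 1).foldl
      (fun ng i => ng ++ [PySem.List.slice padded (some i) (some (i + n))]) ngrams) []

-- ===== PORT B =====
def pvPadB (sentence : List String) (n : Int) : List String :=
  if n > 1 then List.replicate (n - 1).toNat "<s>" ++ PySem.List.slice sentence (some 1) none
  else sentence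

-- _windows: Python recurses on tokens[1:]. For n ≤ 0 (outside Pre_) the Python diverges
-- (RecursionError); the structural match on the empty list makes the Lean port total there.
def pvWindowsB (tokens : List String) (n : Int) : List (List String) :=
  match tokens with
  | [] => []
  | _ :: rest =>
    if (tokens.length : Int) < n then []
    else PySem.List.slice tokens none (some n) :: pvWindowsB rest n

def prepare_ngram_data_alt (sentences : List (List String)) (n : Int) : List (List String) :=
  sentences.flatMap (fun s => pvWindowsB (pvPadB s n) n)

-- ===== PRECONDITION & SPEC =====
-- Pre_ restricts to the natural domain of an n-gram order, n ≥ 1: for n ≤ 0 A's windowing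
-- degenerates (empty tuples, negative-index slice wraparound) while B's recursion does not
-- terminate (RecursionError), so those inputs are excluded.
def Pre_prepare_ngram_data (sentences : List (List String)) (n : Int) : Prop := 1 ≤ n
instance (sentences : List (List String)) (n : Int) : Decidable (Pre_prepare_ngram_data sentences n) := by unfold Pre_prepare_ngram_data; infer_instance

def pvWitness_prepare_ngram_data : List (List String) × Int := ([["<s>", "a", "b", "</s>"]], 2)

def Spec_prepare_ngram_data (sentences : List (List String)) (n : Int) (out : List (List String)) : Prop := out = prepare_ngram_data_alt sentences n
instance (sentences : List (List String)) (n : Int) (out : List (List String)) : Decidable (Spec_prepare_ngram_data sentences n out) := by unfold Spec_prepare_ngram_data; infer_instance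

-- ===== CLAIM (what is proved, stated in full; the proofs are below) =====
def Claim_equal_prepare_ngram_data : Prop := ∀ (sentences : List (List String)) (n : Int), Dom_prepare_ngram_data sentences n → Pre_prepare_ngram_data sentences n → Spec_prepare_ngram_data sentences n (prepare_ngram_data sentences n)

-- ===== LEMMAS AND PROOFS =====

-- B's recursive windows function, in closed form: the windows at every start position
theorem windows_closed (N : Nat) (hN : 1 ≤ N) (p : List String) :
    pvWindowsB p (N : Int) = (List.range (p.length + 1 - N)).map (fun j => (p.drop j).take N) := by
  induction p with
  | nil =>
    rw [pvWindowsB, show ([] : List String).length + 1 - N = 0 from by simp; omega]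
    simp
  | cons x rest ih =>
    rw [pvWindowsB]
    by_cases h : ((x :: rest).length : Int) < (N : Int)
    · rw [if_pos h]
      have hlt : (x :: rest).length < N := by exact_mod_cast h
      rw [show (x :: rest).length + 1 - N = 0 from by omega]
      simp
    · rw [if_neg h]
      have hge : N ≤ (x :: rest).length := by
        have := not_lt.mp h; exact_mod_cast this
      have hstep : (x :: rest).length + 1 - N = (rest.length + 1 - N) + 1 := by
        simp at hge ⊢; omega
      rw [hstep, List.range_succ_eq_map, List.map_cons, List.map_map, ih]
      congr 1
      all_goals simp [PySem.List.slice_to_natCast]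

-- A's inner index loop equals acc ++ B's windows of the same list, for 1 ≤ n
theorem inner_eq (n : Int) (hn : 1 ≤ n) (p : List String) (acc : List (List String)) :
    (PySem.List.pyRange 0 ((p.length : Int) - n + 1) 1).foldl
      (fun ng i => ng ++ [PySem.List.slice p (some i) (some (i + n))]) acc =
    acc ++ pvWindowsB p n := by
  obtain ⟨N, rfl⟩ : ∃ N : Nat, n = (N : Int) := ⟨n.toNat, by omega⟩
  have hN : 1 ≤ N := by exact_mod_cast hn
  rw [PySem.List.foldl_append_singleton_eq_map, windows_closed N hN]
  congr 1
  rw [PySem.List.pyRange_one]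
  have hK : ((p.length : Int) - (N : Int) + 1 - 0).toNat = p.length + 1 - N := by omega
  rw [hK, List.map_map]
  apply List.map_congr_left
  intro j _
  simp only [Function.comp, Int.zero_add]
  have : (j : Int) + (N : Int) = ((j + N : Nat) : Int) := by push_cast; ring
  rw [this, PySem.List.slice_natCast]
  congr 1
  omega

-- ===== VERDICT (by name: the statement is the Claim_ definition above) =====
theorem prepare_ngram_data_spec : Claim_equal_prepare_ngram_data := by
  intro sentences n _ hn
  show prepare_ngram_data sentences n = prepare_ngram_data_alt sentences n
  unfold prepare_ngram_data prepare_ngram_data_alt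
  have hbody : ∀ (acc : List (List String)) (s : List String),
      (fun ngrams sentence =>
        let padded :=
          if n > 1 then List.replicate (n - 1).toNat "<s>" ++ PySem.List.slice sentence (some 1) none
          else sentence
        (PySem.List.pyRange 0 ((padded.length : Int) - n + 1) 1).foldl
          (fun ng i => ng ++ [PySem.List.slice padded (some i) (some (i + n))]) ngrams) acc s
      = acc ++ pvWindowsB (pvPadB s n) n := by
    intro acc s
    simp only [pvPadB]
    exact inner_eq n hn _ acc
  rw [funext (fun acc => funext (fun s => hbody acc s))]
  exact PySem.List.foldl_append_eq_flatMap _ _ _
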